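-- pv_equiv track=rewrite | github.com/Madung2/django-keyvalue | docTransformer/TsExpert/services/utils.py | split_value
-- ===== SOURCE A (Python) =====
-- def split_value(text, split_keywords):
--     # 텍스트를 분리할 최소 위치를 찾기
--     split_index = None
--     for keyword in split_keywords:
--         found_index = text.find(keyword)
--         if found_index != -1:
--             if split_index is None or found_index < split_index:
--                 split_index = found_index
--
--     # 최소 위치에 따라 텍스트 분리
--     if split_index is not None:
--         before_part = text[:split_index].strip()
--         after_part = text[split_index:].strip()
--         return [before_part, after_part]
--     else:
--         return [text]  # 키워드가 없는 경우 전체 텍스트를 반환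
-- ===== SOURCE B (Python) =====
-- def split_value(text, split_keywords):
--     # Scan positions left to right; the first position where any keyword starts
--     # is the split point (same index as the minimum of all finds).
--     keywords = tuple(split_keywords)
--     for i in range(len(text) + 1):
--         if text.startswith(keywords, i):
--             return [text[:i].strip(), text[i:].strip()]
--     return [text]
-- ===== Notes on version B (the rewrite author's own statement) =====
-- stated objective: faster
-- what changed: Instead of computing text.find(k) for every keyword and taking the minimum, B scans text positions left to right and returns at the first position where any keyword matches (text.startswith(keywords, i)), inverting the loop nesting and exiting early at the split point.
import Mathlib
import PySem

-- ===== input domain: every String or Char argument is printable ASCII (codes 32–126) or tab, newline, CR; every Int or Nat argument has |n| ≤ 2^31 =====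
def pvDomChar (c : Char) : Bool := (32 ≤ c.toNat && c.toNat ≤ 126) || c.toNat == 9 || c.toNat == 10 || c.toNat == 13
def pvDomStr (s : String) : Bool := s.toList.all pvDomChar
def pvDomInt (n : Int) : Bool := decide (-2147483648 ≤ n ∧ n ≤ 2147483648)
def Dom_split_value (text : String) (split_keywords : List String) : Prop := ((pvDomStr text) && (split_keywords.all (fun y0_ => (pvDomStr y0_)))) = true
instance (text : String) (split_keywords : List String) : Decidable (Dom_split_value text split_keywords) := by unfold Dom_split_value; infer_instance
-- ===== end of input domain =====

-- B scans text positions left to right and splits at the first position where any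
-- keyword matches, instead of A's per-keyword find + minimum (alternative decomposition).

-- ===== PORT A =====
def split_value (text : String) (split_keywords : List String) : List String :=
  let split_index : Option Int :=
    split_keywords.foldl
      (fun split_index keyword =>
        let found_index := PySem.Str.find text keyword
        if found_index ≠ -1 then
          match split_index with
          | none => some found_index
          | some si => if found_index < si then some found_index else some si
        else split_index)
      none
  match split_index with
  | some si =>
      [PySem.Str.strip (PySem.Str.slice text none (some si)),
       PySem.Str.strip (PySem.Str.slice text (some si) none)]
  | none => [text]

-- ===== PORT B =====
-- the 'for i in range(len(text)+1)' loop, walking the i-th suffix of the text;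
-- text.startswith(keyword, i) with 0 ≤ i ≤ len(text) is exactly the prefix test on that suffix
def splitScan (text : String) (split_keywords : List String) : List Char → Nat → List String
  | suf, i =>
    if split_keywords.any (fun keyword => PySem.Chars.startswith suf keyword.toList) then
      [String.ofList (PySem.Chars.strip (text.toList.take i)),
       String.ofList (PySem.Chars.strip (text.toList.drop i))]
    else
      match suf with
      | [] => [text]
      | _ :: rest => splitScan text split_keywords rest (i + 1)

def split_value_alt (text : String) (split_keywords : List String) : List String :=
  splitScan text split_keywords text.toList 0

-- ===== PRECONDITION & SPEC =====
def Spec_split_value (text : String) (split_keywords : List String) (out : List String) : Prop := out = split_value_alt text split_keywords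
instance (text : String) (split_keywords : List String) (out : List String) : Decidable (Spec_split_value text split_keywords out) := by unfold Spec_split_value; infer_instance

-- ===== CLAIM (what is proved, stated in full; the proofs are below) =====
def Claim_equal_split_value : Prop := ∀ (text : String) (split_keywords : List String), Dom_split_value text split_keywords → Spec_split_value text split_keywords (split_value text split_keywords)

-- ===== LEMMAS AND PROOFS =====

-- proof-only helpers: the loop bodies of the two ports, named so lemmas can talk about them

def stepA (text : String) : Option Int → String → Option Int :=
  fun split_index keyword =>
    let found_index := PySem.Str.find text keyword
    if found_index ≠ -1 then
      match split_index with
      | none => some found_index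
      | some si => if found_index < si then some found_index else some si
    else split_index

def scanIdx (split_keywords : List String) : List Char → Nat → Option Nat
  | suf, i =>
    if split_keywords.any (fun keyword => PySem.Chars.startswith suf keyword.toList) then
      some i
    else
      match suf with
      | [] => none
      | _ :: rest => scanIdx split_keywords rest (i + 1)

theorem split_value_as_fold (text : String) (kws : List String) :
    split_value text kws =
      (match List.foldl (stepA text) none kws with
       | some si =>
           [PySem.Str.strip (PySem.Str.slice text none (some si)),
            PySem.Str.strip (PySem.Str.slice text (some si) none)]
       | none => [text]) := rfl

theorem splitScan_as_scanIdx (text : String) (kws : List String) :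
    ∀ (suf : List Char) (i : Nat),
      splitScan text kws suf i =
        (match scanIdx kws suf i with
         | some m =>
             [String.ofList (PySem.Chars.strip (List.take m text.toList)),
              String.ofList (PySem.Chars.strip (List.drop m text.toList))]
         | none => [text])
  | suf, i => by
    cases suf with
    | nil => simp only [splitScan, scanIdx]; split <;> rfl
    | cons c rest =>
        simp only [splitScan, scanIdx]
        split
        · rfl
        · exact splitScan_as_scanIdx text kws rest (i + 1)

theorem foldA_spec (text : String) (kws : List String) : ∀ st : Option Int,
    (List.foldl (stepA text) st kws = none →
        st = none ∧ ∀ k ∈ kws, PySem.Str.find text k = -1) ∧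
    (∀ v, List.foldl (stepA text) st kws = some v →
        st = some v ∨ ∃ k ∈ kws, PySem.Str.find text k = v ∧ v ≠ -1) ∧
    (∀ k ∈ kws, PySem.Str.find text k ≠ -1 →
        ∃ v, List.foldl (stepA text) st kws = some v ∧ v ≤ PySem.Str.find text k) ∧
    (∀ y, st = some y →
        ∃ v, List.foldl (stepA text) st kws = some v ∧ v ≤ y) := by
  induction kws with
  | nil =>
      intro st
      refine ⟨fun h => ⟨h, by simp⟩, fun v h => Or.inl h, by simp, ?_⟩
      intro y hy; exact ⟨y, hy, le_refl y⟩
  | cons k t ih =>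
      intro st
      have step_none : PySem.Str.find text k = -1 → stepA text st k = st := by
        intro hf; simp only [stepA]; rw [if_neg (not_not_intro hf)]
      have step_some_none : PySem.Str.find text k ≠ -1 →
          stepA text none k = some (PySem.Str.find text k) := by
        intro hf; simp only [stepA]; rw [if_pos hf]
      have step_some_lt : ∀ si, PySem.Str.find text k ≠ -1 → PySem.Str.find text k < si →
          stepA text (some si) k = some (PySem.Str.find text k) := by
        intro si hf hlt; simp only [stepA]; rw [if_pos hf]; exact if_pos hlt
      have step_some_ge : ∀ si, PySem.Str.find text k ≠ -1 → ¬ PySem.Str.find text k < si →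
          stepA text (some si) k = some si := by
        intro si hf hlt; simp only [stepA]; rw [if_pos hf]; exact if_neg hlt
      have step_some : PySem.Str.find text k ≠ -1 →
          ∃ w, stepA text st k = some w ∧ w ≤ PySem.Str.find text k := by
        intro hf
        cases st with
        | none => exact ⟨PySem.Str.find text k, step_some_none hf, le_refl _⟩
        | some si =>
            by_cases hlt : PySem.Str.find text k < si
            · exact ⟨PySem.Str.find text k, step_some_lt si hf hlt, le_refl _⟩
            · exact ⟨si, step_some_ge si hf hlt, le_of_not_gt hlt⟩
      have step_mono : ∀ y, st = some y → ∃ w, stepA text st k = some w ∧ w ≤ y := by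
        intro y hy; subst hy
        by_cases hf : PySem.Str.find text k = -1
        · exact ⟨y, step_none hf, le_refl y⟩
        · by_cases hlt : PySem.Str.find text k < y
          · exact ⟨PySem.Str.find text k, step_some_lt y hf hlt, le_of_lt hlt⟩
          · exact ⟨y, step_some_ge y hf hlt, le_refl y⟩
      refine ⟨?_, ?_, ?_, ?_⟩
      · intro h
        have hfold : List.foldl (stepA text) (stepA text st k) t = none := by
          simpa using h
        obtain ⟨hst, hall⟩ := (ih (stepA text st k)).1 hfold
        by_cases hf : PySem.Str.find text k = -1
        · rw [step_none hf] at hst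
          refine ⟨hst, ?_⟩
          intro k' hk'
          rcases List.mem_cons.mp hk' with rfl | hk'
          · exact hf
          · exact hall _ hk'
        · obtain ⟨w, hw, _⟩ := step_some hf
          rw [hw] at hst; exact absurd hst (by simp)
      · intro v h
        have hfold : List.foldl (stepA text) (stepA text st k) t = some v := by
          simpa using h
        rcases (ih (stepA text st k)).2.1 v hfold with hstep | ⟨k', hk', hfk', hne⟩
        · by_cases hf : PySem.Str.find text k = -1
          · left; rw [step_none hf] at hstep; exact hstep
          · cases st with
            | none =>
                right
                rw [step_some_none hf] at hstep
                exact ⟨k, List.mem_cons_self, Option.some.inj hstep, by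
                  rw [Option.some.inj hstep] at hf; exact hf⟩
            | some si =>
                by_cases hlt : PySem.Str.find text k < si
                · right
                  rw [step_some_lt si hf hlt] at hstep
                  exact ⟨k, List.mem_cons_self, Option.some.inj hstep, by
                    rw [Option.some.inj hstep] at hf; exact hf⟩
                · left
                  rw [step_some_ge si hf hlt] at hstep
                  rw [Option.some.inj hstep]
        · exact Or.inr ⟨k', List.mem_cons_of_mem _ hk', hfk', hne⟩
      · intro k' hk' hfk'
        rcases List.mem_cons.mp hk' with rfl | hk'
        · obtain ⟨w, hw, hwle⟩ := step_some hfk'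
          obtain ⟨v, hv, hvle⟩ := (ih (stepA text st k')).2.2.2 w hw
          exact ⟨v, by simpa using hv, le_trans hvle hwle⟩
        · obtain ⟨v, hv, hvle⟩ := (ih (stepA text st k)).2.2.1 k' hk' hfk'
          exact ⟨v, by simpa using hv, hvle⟩
      · intro y hy
        obtain ⟨w, hw, hwle⟩ := step_mono y hy
        obtain ⟨v, hv, hvle⟩ := (ih (stepA text st k)).2.2.2 w hw
        exact ⟨v, by simpa using hv, le_trans hvle hwle⟩

theorem scanIdx_none (kws : List String) :
    ∀ (suf : List Char) (i : Nat), scanIdx kws suf i = none →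
      ∀ d, ¬ ∃ kw ∈ kws, kw.toList <+: suf.drop d
  | suf, i => by
    cases suf with
    | nil =>
        intro h d hP
        obtain ⟨kw, hkw, hpre⟩ := hP
        simp only [scanIdx] at h
        split at h
        · exact absurd h (by simp)
        · rename_i hany
          exact hany (List.any_eq_true.mpr ⟨kw, hkw,
            (PySem.Chars.startswith_iff _ _).mpr (by simpa using hpre)⟩)
    | cons c rest =>
        intro h d
        simp only [scanIdx] at h
        split at h
        · exact absurd h (by simp)
        · rename_i hany
          cases d with
          | zero =>
              intro hP
              obtain ⟨kw, hkw, hpre⟩ := hP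
              exact hany (List.any_eq_true.mpr ⟨kw, hkw,
                (PySem.Chars.startswith_iff _ _).mpr (by simpa using hpre)⟩)
          | succ d => exact scanIdx_none kws rest (i + 1) h d

theorem scanIdx_some (kws : List String) :
    ∀ (suf : List Char) (i m : Nat), scanIdx kws suf i = some m →
      i ≤ m ∧ (∃ kw ∈ kws, kw.toList <+: suf.drop (m - i)) ∧
      ∀ d < m - i, ¬ ∃ kw ∈ kws, kw.toList <+: suf.drop d
  | suf, i => by
    cases suf with
    | nil =>
        intro m h
        simp only [scanIdx] at h
        split at h
        · rename_i hany
          obtain rfl : i = m := Option.some.inj h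
          obtain ⟨kw, hkw, hsw⟩ := List.any_eq_true.mp hany
          exact ⟨le_refl i, ⟨kw, hkw, by
            simpa using (PySem.Chars.startswith_iff _ _).mp hsw⟩, by omega⟩
        · exact absurd h (by simp)
    | cons c rest =>
        intro m h
        simp only [scanIdx] at h
        split at h
        · rename_i hany
          obtain rfl : i = m := Option.some.inj h
          obtain ⟨kw, hkw, hsw⟩ := List.any_eq_true.mp hany
          exact ⟨le_refl i, ⟨kw, hkw, by
            simpa using (PySem.Chars.startswith_iff _ _).mp hsw⟩, by omega⟩
        · rename_i hany
          obtain ⟨hle, ⟨kw, hkw, hpre⟩, hmin⟩ := scanIdx_some kws rest (i + 1) m h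
          refine ⟨by omega, ⟨kw, hkw, ?_⟩, ?_⟩
          · have : (c :: rest).drop (m - i) = rest.drop (m - (i + 1)) := by
              have : m - i = (m - (i + 1)) + 1 := by omega
              simp [this]
            rw [this]; exact hpre
          · intro d hd
            cases d with
            | zero =>
                intro hP
                obtain ⟨kw', hkw', hpre'⟩ := hP
                exact hany (List.any_eq_true.mpr ⟨kw', hkw',
                  (PySem.Chars.startswith_iff _ _).mpr (by simpa using hpre')⟩)
            | succ d =>
                intro hP
                exact hmin d (by omega) (by simpa using hP)

-- A keyword has a match in the text iff its find is not -1
theorem find_spec_zero (cs kw : List Char) (h : PySem.Chars.find cs kw ≠ -1) :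
    kw <+: cs.drop (PySem.Chars.find cs kw).toNat ∧
      ∀ i < (PySem.Chars.find cs kw).toNat, ¬ kw <+: cs.drop i := by
  have hspec := PySem.Chars.findFrom_natCast_spec cs kw 0 (Nat.zero_le _)
  rw [Nat.cast_zero, PySem.Chars.findFrom_zero] at hspec
  obtain ⟨_, hpre, hmin⟩ := hspec h
  exact ⟨hpre, fun i hi => hmin i (Nat.zero_le _) hi⟩

theorem split_value_main (text : String) (kws : List String) :
    split_value text kws = split_value_alt text kws := by
  rw [split_value_as_fold]
  show _ = splitScan text kws text.toList 0
  rw [splitScan_as_scanIdx]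
  rcases hr : List.foldl (stepA text) none kws with _ | v
  · -- no keyword occurs: all finds are -1, so the scan never fires either
    have hall := ((foldA_spec text kws none).1 hr).2
    have hscan : scanIdx kws text.toList 0 = none := by
      cases hs : scanIdx kws text.toList 0 with
      | none => rfl
      | some m =>
          obtain ⟨_, ⟨kw, hkw, hpre⟩, _⟩ := scanIdx_some kws text.toList 0 m hs
          have hinf : kw.toList <:+: text.toList :=
            (PySem.Chars.isIn_iff_infix _ _).mp
              ((PySem.Chars.exists_prefix_drop_iff_isIn _ _).mp ⟨m - 0, hpre⟩)
          have : PySem.Chars.find text.toList kw.toList = -1 := by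
            rw [← PySem.Str.find_eq]; exact hall kw hkw
          exact absurd hinf ((PySem.Chars.find_eq_neg_one_iff _ _).mp this)
    rw [hscan]
  · -- some keyword occurs: v is the minimal find, and the scan stops exactly there
    rcases (foldA_spec text kws none).2.1 v hr with habs | ⟨k, hk, hfk, hne⟩
    · exact absurd habs (by simp)
    have hfk' : PySem.Chars.find text.toList k.toList = v := by
      rw [← PySem.Str.find_eq]; exact hfk
    have hne' : PySem.Chars.find text.toList k.toList ≠ -1 := by rw [hfk']; exact hne
    have hv0 : 0 ≤ v := by
      rw [← hfk']
      exact (PySem.Chars.find_nonneg_iff _ _).mpr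
        ((PySem.Chars.find_ne_neg_one_iff _ _).mp hne')
    set m := v.toNat with hm
    have hvm : (m : Int) = v := Int.toNat_of_nonneg hv0
    have hPm : ∃ kw ∈ kws, kw.toList <+: text.toList.drop m := by
      refine ⟨k, hk, ?_⟩
      have := (find_spec_zero text.toList k.toList hne').1
      rwa [hfk'] at this
    have hPmin : ∀ j < m, ¬ ∃ kw ∈ kws, kw.toList <+: text.toList.drop j := by
      intro j hj ⟨kw, hkw, hpre⟩
      have hinf : kw.toList <:+: text.toList :=
        (PySem.Chars.isIn_iff_infix _ _).mp
          ((PySem.Chars.exists_prefix_drop_iff_isIn _ _).mp ⟨j, hpre⟩)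
      have hne2 : PySem.Chars.find text.toList kw.toList ≠ -1 :=
        (PySem.Chars.find_ne_neg_one_iff _ _).mpr hinf
      have hne2' : PySem.Str.find text kw ≠ -1 := by rw [PySem.Str.find_eq]; exact hne2
      obtain ⟨v', hv', hvle⟩ := (foldA_spec text kws none).2.2.1 kw hkw hne2'
      rw [hr] at hv'
      obtain rfl : v = v' := Option.some.inj hv'
      have hvle' : v ≤ PySem.Chars.find text.toList kw.toList := by
        rw [← PySem.Str.find_eq]; exact hvle
      have hjge := (find_spec_zero text.toList kw.toList hne2).2 j
      have : (PySem.Chars.find text.toList kw.toList).toNat ≤ j := by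
        by_contra hlt
        exact hjge (by omega) hpre
      have : m ≤ (PySem.Chars.find text.toList kw.toList).toNat := by
        have := PySem.Chars.find_nonneg_iff text.toList kw.toList
        omega
      omega
    have hscan : scanIdx kws text.toList 0 = some m := by
      cases hs : scanIdx kws text.toList 0 with
      | none => exact absurd hPm (scanIdx_none kws text.toList 0 hs m)
      | some m' =>
          obtain ⟨_, hPm', hmin'⟩ := scanIdx_some kws text.toList 0 m' hs
          simp only [Nat.sub_zero] at hPm' hmin'
          have : m' = m := by
            rcases Nat.lt_trichotomy m' m with h | h | h
            · exact absurd hPm' (hPmin m' h)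
            · exact h
            · exact absurd hPm (hmin' m h)
          rw [this]
    rw [hscan]
    show [PySem.Str.strip (PySem.Str.slice text none (some v)),
          PySem.Str.strip (PySem.Str.slice text (some v) none)] =
        [String.ofList (PySem.Chars.strip (List.take m text.toList)),
         String.ofList (PySem.Chars.strip (List.drop m text.toList))]
    have e1 : PySem.Str.strip (PySem.Str.slice text none (some v)) =
        String.ofList (PySem.Chars.strip (List.take m text.toList)) := by
      apply String.toList_inj.mp
      rw [PySem.Str.toList_strip, PySem.Str.toList_slice, PySem.Chars.slice_eq_listSlice,
        ← hvm, PySem.List.slice_to_natCast, String.toList_ofList]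
    have e2 : PySem.Str.strip (PySem.Str.slice text (some v) none) =
        String.ofList (PySem.Chars.strip (List.drop m text.toList)) := by
      apply String.toList_inj.mp
      rw [PySem.Str.toList_strip, PySem.Str.toList_slice, PySem.Chars.slice_eq_listSlice,
        ← hvm, PySem.List.slice_from_natCast, String.toList_ofList]
    rw [e1, e2]

-- ===== VERDICT (by name: the statement is the Claim_ definition above) =====
theorem split_value_spec : Claim_equal_split_value := by
  intro text kws _
  unfold Spec_split_value
  exact split_value_main text kws
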